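-- pv_equiv track=rewrite | github.com/drewjm03/GolfCoach | golfcoach/pose3d/joints3d_kf_triang_opt.py | find_joint
-- ===== SOURCE A (Python) =====
-- from typing import Dict, Iterable, List, Sequence, Tuple, Optional
--
-- def find_joint(joint_names: Sequence[str], candidates: Sequence[str]) -> int:
-- 	# Prefer exact (case-insensitive) match, then fallback to substring.
-- 	jn_lower = [str(s).lower() for s in joint_names]
-- 	cands_lower = [str(c).lower() for c in candidates]
-- 	# Exact first
-- 	for cl in cands_lower:
-- 		for i, nm in enumerate(jn_lower):
-- 			if cl == nm:
-- 				return i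
-- 	# Substring fallback
-- 	for cl in cands_lower:
-- 		for i, nm in enumerate(jn_lower):
-- 			if cl in nm:
-- 				return i
-- 	raise KeyError(f"Could not find any candidate {list(candidates)} in joint_names={list(joint_names)}")
-- ===== SOURCE B (Python) =====
-- def find_joint(joint_names, candidates):
--     # One pass over candidates with an exact-match index built once and a memoized
--     # substring fallback; same value as the two-phase scan.
--     jn_lower = [str(s).lower() for s in joint_names]
--     first = {}
--     for i, nm in enumerate(jn_lower):
--         first.setdefault(nm, i)
--     fallback = None
--     for c in candidates:
--         cl = str(c).lower()
--         hit = first.get(cl)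
--         if hit is not None:
--             return hit
--         if fallback is None:
--             for i, nm in enumerate(jn_lower):
--                 if cl in nm:
--                     fallback = i
--                     break
--     if fallback is not None:
--         return fallback
--     raise KeyError(f"Could not find any candidate {list(candidates)} in joint_names={list(joint_names)}")
-- ===== Notes on version B (the rewrite author's own statement) =====
-- stated objective: simpler
-- what changed: Replaces A's two separate candidate-major phases (exact scan over all candidates, then a second substring scan over all candidates) by a single pass over candidates that consults a lowercased-name-to-first-index dict for exact matches and memoizes the first substring hit as a fallback.
import Mathlib
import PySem

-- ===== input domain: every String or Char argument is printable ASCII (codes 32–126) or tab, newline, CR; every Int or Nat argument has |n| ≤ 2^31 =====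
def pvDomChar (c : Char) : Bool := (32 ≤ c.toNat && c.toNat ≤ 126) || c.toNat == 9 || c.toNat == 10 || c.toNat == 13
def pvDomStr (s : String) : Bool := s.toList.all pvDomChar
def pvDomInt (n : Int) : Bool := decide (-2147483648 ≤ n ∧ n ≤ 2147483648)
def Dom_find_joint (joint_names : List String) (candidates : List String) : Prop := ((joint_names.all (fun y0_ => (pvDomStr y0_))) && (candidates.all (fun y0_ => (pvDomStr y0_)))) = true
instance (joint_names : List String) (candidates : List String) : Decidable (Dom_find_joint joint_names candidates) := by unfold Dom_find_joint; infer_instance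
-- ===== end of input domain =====

-- B replaces A's two candidate-major phase loops by one pass over candidates with a
-- first-index dict for exact matches and a memoized substring fallback (simpler single pass).
-- Both Pythons raise KeyError when no candidate matches; Pre_ excludes exactly those inputs.

-- ===== PORT A =====
-- inner scan of phase 1: first joint index whose (lowered) name equals cl
def pvFindEqA (cl : String) (i : Int) : List String → Option Int
  | [] => none
  | nm :: rest => if cl = nm then some i else pvFindEqA cl (i + 1) rest

-- inner scan of phase 2 (also the shape of B's fallback scan): first joint whose name contains cl
def pvFindSub (cl : String) (i : Int) : List String → Option Int
  | [] => none
  | nm :: rest => if PySem.Str.isIn cl nm then some i else pvFindSub cl (i + 1) rest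

-- phase 1: exact (case-insensitive) match, candidate-major
def pvPhase1A (jn : List String) : List String → Option Int
  | [] => none
  | cl :: rest =>
    match pvFindEqA cl 0 jn with
    | some i => some i
    | none => pvPhase1A jn rest

-- phase 2: substring fallback, candidate-major
def pvPhase2A (jn : List String) : List String → Option Int
  | [] => none
  | cl :: rest =>
    match pvFindSub cl 0 jn with
    | some i => some i
    | none => pvPhase2A jn rest

def find_joint (joint_names : List String) (candidates : List String) : Int :=
  let jn_lower := joint_names.map PySem.Str.lower
  let cands_lower := candidates.map PySem.Str.lower
  match pvPhase1A jn_lower cands_lower with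
  | some i => i
  | none =>
    match pvPhase2A jn_lower cands_lower with
    | some i => i
    | none => 0   -- Python raises KeyError here; excluded by Pre_find_joint

-- ===== PORT B =====
-- the dict mapping each lowered joint name to its first index (setdefault: first wins)
def pvFirstDict (jn_lower : List String) : PySem.Dict String Int :=
  (PySem.List.enumerate jn_lower).foldl (fun d p => d.setdefault p.2 p.1) PySem.Dict.empty

-- single pass over candidates: return dict hit; otherwise memoize the substring fallback
def pvLoopB (first : PySem.Dict String Int) (jn_lower : List String) :
    List String → Option Int → Int
  | [], fb => fb.getD 0   -- Python raises KeyError when fb is None; excluded by Pre_find_joint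
  | c :: rest, fb =>
    let cl := PySem.Str.lower c
    match first.get? cl with
    | some i => i
    | none => pvLoopB first jn_lower rest (if fb.isSome then fb else pvFindSub cl 0 jn_lower)

def find_joint_alt (joint_names : List String) (candidates : List String) : Int :=
  let jn_lower := joint_names.map PySem.Str.lower
  pvLoopB (pvFirstDict jn_lower) jn_lower candidates none

-- ===== PRECONDITION & SPEC =====
-- Pre_ excludes exactly the inputs where no lowered candidate occurs as a substring of
-- (in particular, equals) any lowered joint name: there Python A raises KeyError (and B raises too).
def Pre_find_joint (joint_names : List String) (candidates : List String) : Prop :=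
  ∃ c ∈ candidates, ∃ nm ∈ joint_names,
    PySem.Str.isIn (PySem.Str.lower c) (PySem.Str.lower nm) = true
instance (joint_names : List String) (candidates : List String) : Decidable (Pre_find_joint joint_names candidates) := by unfold Pre_find_joint; infer_instance

def pvWitness_find_joint : List String × List String := (["Hip", "Left Knee"], ["knee"])

def Spec_find_joint (joint_names : List String) (candidates : List String) (out : Int) : Prop := out = find_joint_alt joint_names candidates
instance (joint_names : List String) (candidates : List String) (out : Int) : Decidable (Spec_find_joint joint_names candidates out) := by unfold Spec_find_joint; infer_instance

-- ===== CLAIM (what is proved, stated in full; the proofs are below) =====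
def Claim_equal_find_joint : Prop := ∀ (joint_names : List String) (candidates : List String), Dom_find_joint joint_names candidates → Pre_find_joint joint_names candidates → Spec_find_joint joint_names candidates (find_joint joint_names candidates)

-- ===== LEMMAS AND PROOFS =====

-- the first-index dict looks up exactly what A's phase-1 inner scan finds
theorem pvFirstDict_get (jn : List String) (cl : String) :
    ∀ (s : Int) (d : PySem.Dict String Int),
      ((PySem.List.enumerate jn s).foldl (fun d p => d.setdefault p.2 p.1) d).get? cl
        = (d.get? cl).orElse (fun _ => pvFindEqA cl s jn) := by
  induction jn with
  | nil => intro s d; simp [PySem.List.enumerate_nil, pvFindEqA]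
  | cons nm rest ih =>
    intro s d
    rw [PySem.List.enumerate_cons]
    simp only [List.foldl_cons]
    rw [ih]
    by_cases h : cl = nm
    · subst h
      rw [PySem.Dict.get?_setdefault_self]
      simp [pvFindEqA]
    · rw [PySem.Dict.get?_setdefault_of_ne d s h]
      simp [pvFindEqA, h]

-- B's loop equals A's two-phase result, with the memoized fallback threaded through
theorem pvLoopB_eq (jn : List String) :
    ∀ (cs : List String) (fb : Option Int),
      pvLoopB (pvFirstDict jn) jn cs fb
        = match pvPhase1A jn (cs.map PySem.Str.lower) with
          | some i => i
          | none => (fb.orElse (fun _ => pvPhase2A jn (cs.map PySem.Str.lower))).getD 0 := by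
  intro cs
  induction cs with
  | nil => intro fb; simp [pvLoopB, pvPhase1A, pvPhase2A]
  | cons c rest ih =>
    intro fb
    simp only [pvLoopB, List.map_cons]
    have hget : (pvFirstDict jn).get? (PySem.Str.lower c)
        = pvFindEqA (PySem.Str.lower c) 0 jn := by
      have := pvFirstDict_get jn (PySem.Str.lower c) 0 PySem.Dict.empty
      simpa [pvFirstDict] using this
    rw [hget]
    cases hfe : pvFindEqA (PySem.Str.lower c) 0 jn with
    | some i => simp [pvPhase1A, hfe]
    | none =>
      simp only [pvPhase1A, pvPhase2A, hfe]
      rw [ih]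
      cases hp1 : pvPhase1A jn (rest.map PySem.Str.lower) with
      | some i => simp
      | none =>
        simp only []
        cases fb with
        | some x => simp
        | none =>
          simp only [Option.isSome_none, Bool.false_eq_true]
          cases pvFindSub (PySem.Str.lower c) 0 jn <;> simp

-- ===== VERDICT (by name: the statement is the Claim_ definition above) =====
theorem find_joint_spec : Claim_equal_find_joint := by
  intro jn cs _ _
  unfold Spec_find_joint find_joint find_joint_alt
  rw [pvLoopB_eq]
  cases h1 : pvPhase1A (jn.map PySem.Str.lower) (cs.map PySem.Str.lower) with
  | some i => simp [h1]
  | none =>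
    cases h2 : pvPhase2A (jn.map PySem.Str.lower) (cs.map PySem.Str.lower) <;> simp [h1, h2]
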